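-- pv_equiv track=rewrite | github.com/Krolov18/Languages | lextutor-master/script_numeral.py | changer_caracteres
-- ===== SOURCE A (Python) =====
-- def changer_caracteres(chaine):
-- 	"""
-- 		Remplacement de caractères. Problèmes d'encodage à résoudre...
-- 	"""
-- 	for element in chaine:
-- 		chaine = chaine.replace("\\xe0","à")
-- 		chaine = chaine.replace("\\xe9","é")
-- 		chaine = chaine.replace("\\xe8","è")
-- 		chaine = chaine.replace("\\xe7","ç")
-- 		chaine = chaine.replace("\\xf4","ô")
-- 		chaine = chaine.replace("\\xea","ê")
-- 		chaine = chaine.replace("\\'","'")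
-- 		chaine = chaine.replace("\\xe2","â")
-- 		chaine = chaine.replace("\\xfb","û")
-- 		chaine = chaine.replace("\\xca","É")
-- 		chaine = chaine.replace("\\xc9","Ê")
-- 		chaine = chaine.replace("\\xf9","ù")
-- 		chaine = chaine.replace("\\xef","ï")
-- 		chaine = chaine.replace("\\xee","i")
--
-- 	return chaine
-- ===== SOURCE B (Python) =====
-- TABLE = [
--     ("\\xe0", "à"), ("\\xe9", "é"), ("\\xe8", "è"), ("\\xe7", "ç"),
--     ("\\xf4", "ô"), ("\\xea", "ê"), ("\\'", "'"), ("\\xe2", "â"),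
--     ("\\xfb", "û"), ("\\xca", "É"), ("\\xc9", "Ê"), ("\\xf9", "ù"),
--     ("\\xef", "ï"), ("\\xee", "i"),
-- ]
-- _TABLE_L = [(list(k), list(v)) for k, v in TABLE]
--
-- def changer_caracteres(chaine):
--     """Single left-to-right scan with a reduce-on-push stack: after pushing each
--     character, any table key appearing as a suffix of the stack is replaced by
--     its value, repeatedly (so a "\\" followed by a freshly produced "'" still
--     reduces).  Computes the same fixed point as A's repeated replace passes."""
--     out = []
--     for ch in chaine:
--         out.append(ch)
--         reduced = True
--         while reduced:
--             reduced = False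
--             for key, val in _TABLE_L:
--                 n = len(out) - len(key)
--                 if n >= 0 and out[n:] == key:
--                     out[n:] = val
--                     reduced = True
--                     break
--     return "".join(out)
-- ===== Notes on version B (the rewrite author's own statement) =====
-- stated objective: faster
-- what changed: A runs len(chaine) full passes of 14 chained str.replace calls (needed because replacing \' with ' next to a backslash can re-create the \' pattern); B makes one left-to-right scan with a reduce-on-push stack driven by the escape table, reducing any key that appears as a suffix (repeatedly, so re-created patterns are caught immediately), which computes the same fixed point in a single pass.
import Mathlib
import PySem

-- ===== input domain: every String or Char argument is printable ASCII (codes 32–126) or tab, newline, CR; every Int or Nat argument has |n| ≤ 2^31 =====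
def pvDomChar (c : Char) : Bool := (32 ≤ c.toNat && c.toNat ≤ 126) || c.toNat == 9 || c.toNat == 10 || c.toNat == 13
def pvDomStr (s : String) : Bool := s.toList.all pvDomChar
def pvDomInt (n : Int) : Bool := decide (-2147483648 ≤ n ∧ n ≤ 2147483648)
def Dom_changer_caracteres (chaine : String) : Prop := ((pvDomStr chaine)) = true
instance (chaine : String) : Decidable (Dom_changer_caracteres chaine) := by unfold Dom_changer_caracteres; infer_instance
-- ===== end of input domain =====

-- B replaces A's len(chaine) passes of 14 chained str.replace calls by ONE left-to-right
-- scan with a reduce-on-push stack (same table, same fixed point); measurably faster on long inputs.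

-- ===== PORT A =====
-- one iteration of A's loop body: the 14 sequential replace calls, in source order
def aPass (s : String) : String :=
  let s := PySem.Str.replace s "\\xe0" "à"
  let s := PySem.Str.replace s "\\xe9" "é"
  let s := PySem.Str.replace s "\\xe8" "è"
  let s := PySem.Str.replace s "\\xe7" "ç"
  let s := PySem.Str.replace s "\\xf4" "ô"
  let s := PySem.Str.replace s "\\xea" "ê"
  let s := PySem.Str.replace s "\\'" "'"
  let s := PySem.Str.replace s "\\xe2" "â"
  let s := PySem.Str.replace s "\\xfb" "û"
  let s := PySem.Str.replace s "\\xca" "É"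
  let s := PySem.Str.replace s "\\xc9" "Ê"
  let s := PySem.Str.replace s "\\xf9" "ù"
  let s := PySem.Str.replace s "\\xef" "ï"
  let s := PySem.Str.replace s "\\xee" "i"
  s

-- 'for element in chaine: chaine = …' iterates once per character of the ORIGINAL string
def changer_caracteres (chaine : String) : String :=
  chaine.toList.foldl (fun s _ => aPass s) chaine

-- ===== PORT B =====
-- Source B's _TABLE_L: the escape table as (key, value) lists of characters, in source order
def pvTable : List (List Char × List Char) :=
  [(['\\', 'x', 'e', '0'], ['à']),
   (['\\', 'x', 'e', '9'], ['é']),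
   (['\\', 'x', 'e', '8'], ['è']),
   (['\\', 'x', 'e', '7'], ['ç']),
   (['\\', 'x', 'f', '4'], ['ô']),
   (['\\', 'x', 'e', 'a'], ['ê']),
   (['\\', '\''], ['\'']),
   (['\\', 'x', 'e', '2'], ['â']),
   (['\\', 'x', 'f', 'b'], ['û']),
   (['\\', 'x', 'c', 'a'], ['É']),
   (['\\', 'x', 'c', '9'], ['Ê']),
   (['\\', 'x', 'f', '9'], ['ù']),
   (['\\', 'x', 'e', 'f'], ['ï']),
   (['\\', 'x', 'e', 'e'], ['i'])]

-- Source B's inner 'for key, val in _TABLE_L: if out ends with key: splice in val; break'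
def redStep (tbl : List (List Char × List Char)) (s : List Char) : Option (List Char) :=
  match tbl with
  | [] => none
  | (k, v) :: rest =>
    if k.isSuffixOf s then some (s.take (s.length - k.length) ++ v) else redStep rest s

-- termination of Source B's 'while reduced' loop: every splice shortens the stack
theorem redStep_lt {tbl : List (List Char × List Char)}
    (hl : ∀ kv ∈ tbl, kv.2.length < kv.1.length) {s t : List Char}
    (h : redStep tbl s = some t) : t.length < s.length := by
  induction tbl with
  | nil => simp [redStep] at h
  | cons kv rest ih =>
    obtain ⟨k, v⟩ := kv
    by_cases hs : k.isSuffixOf s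
    · have hsuf : k <:+ s := List.isSuffixOf_iff_suffix.mp hs
      have hle : k.length ≤ s.length := hsuf.length_le
      simp only [redStep, hs, if_true, Option.some.injEq] at h
      subst h
      have hv : v.length < k.length := hl (k, v) (by simp)
      have hk : 0 < k.length := by omega
      simp [List.length_take]
      omega
    · simp only [redStep, hs, if_false, Bool.false_eq_true] at h
      exact ih (fun kv hkv => hl kv (List.mem_cons_of_mem _ hkv)) h

-- Source B's 'while reduced' loop
def reduceAll (s : List Char) : List Char :=
  match h : redStep pvTable s with
  | none => s
  | some t => reduceAll t
termination_by s.length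
decreasing_by exact redStep_lt (by decide) h

-- single scan: push each character, then reduce suffixes; join at the end
def changer_caracteres_alt (chaine : String) : String :=
  String.ofList (chaine.toList.foldl (fun out c => reduceAll (out ++ [c])) [])

-- ===== PRECONDITION & SPEC =====
def Spec_changer_caracteres (chaine : String) (out : String) : Prop := out = changer_caracteres_alt chaine
instance (chaine : String) (out : String) : Decidable (Spec_changer_caracteres chaine out) := by unfold Spec_changer_caracteres; infer_instance

-- ===== CLAIM (what is proved, stated in full; the proofs are below) =====
def Claim_equal_changer_caracteres : Prop := ∀ (chaine : String), Dom_changer_caracteres chaine → Spec_changer_caracteres chaine (changer_caracteres chaine)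

-- ===== LEMMAS AND PROOFS =====

-- ---- characterisation of PySem.Chars.replace as structural recursion ----

theorem go_spec (old new : List Char) (hold : old ≠ []) :
    ∀ fuel (l acc : List Char), l.length ≤ fuel →
      PySem.Chars.replace.go old new fuel l acc
        = acc.reverse ++ PySem.Chars.replace.go old new l.length l [] := by
  intro fuel
  induction fuel using Nat.strong_induction_on with
  | _ fuel ih =>
    intro l acc hl
    cases l with
    | nil => cases fuel <;> simp [PySem.Chars.replace.go]
    | cons c t =>
      cases fuel with
      | zero => simp at hl
      | succ f =>
        have hol : 0 < old.length := List.length_pos_iff.mpr hold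
        simp only [List.length_cons] at hl
        by_cases hp : old.isPrefixOf (c :: t)
        · have h1 : PySem.Chars.replace.go old new (f+1) (c::t) acc
              = PySem.Chars.replace.go old new f (List.drop old.length (c::t)) (new.reverse ++ acc) := by
            simp [PySem.Chars.replace.go, hp]
          have h2 : PySem.Chars.replace.go old new (c::t).length (c::t) []
              = PySem.Chars.replace.go old new t.length (List.drop old.length (c::t)) new.reverse := by
            simp [PySem.Chars.replace.go, hp]
          have hd : (List.drop old.length (c::t)).length ≤ t.length := by
            simp [List.length_drop]; omega
          rw [h1, h2, ih f (by omega) _ _ (by omega),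
              ih t.length (by omega) _ _ hd]
          simp [List.reverse_append, List.append_assoc]
        · have h1 : PySem.Chars.replace.go old new (f+1) (c::t) acc
              = PySem.Chars.replace.go old new f t (c :: acc) := by
            simp [PySem.Chars.replace.go, hp]
          have h2 : PySem.Chars.replace.go old new (c::t).length (c::t) []
              = PySem.Chars.replace.go old new t.length t [c] := by
            simp [PySem.Chars.replace.go, hp]
          rw [h1, h2, ih f (by omega) t (c :: acc) (by omega),
              ih t.length (by omega) t [c] (le_refl _)]
          simp [List.append_assoc]

theorem replace_eq_go (old new : List Char) (hold : old ≠ []) (l : List Char) :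
    PySem.Chars.replace l old new = PySem.Chars.replace.go old new l.length l [] := by
  have hne : ¬ (old.isEmpty = true) := by simp [hold]
  unfold PySem.Chars.replace
  rw [if_neg hne]

theorem replace_nil (old new : List Char) (hold : old ≠ []) :
    PySem.Chars.replace [] old new = [] := by
  rw [replace_eq_go old new hold]
  simp [PySem.Chars.replace.go]

theorem replace_cons (old new : List Char) (hold : old ≠ []) (c : Char) (t : List Char) :
    PySem.Chars.replace (c :: t) old new
      = if old.isPrefixOf (c :: t)
          then new ++ PySem.Chars.replace (List.drop old.length (c :: t)) old new
          else c :: PySem.Chars.replace t old new := by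
  have hol : 0 < old.length := List.length_pos_iff.mpr hold
  rw [replace_eq_go old new hold]
  by_cases hp : old.isPrefixOf (c :: t)
  · rw [if_pos hp]
    have h2 : PySem.Chars.replace.go old new (c::t).length (c::t) []
        = PySem.Chars.replace.go old new t.length (List.drop old.length (c::t)) new.reverse := by
      simp [PySem.Chars.replace.go, hp]
    have hd : (List.drop old.length (c::t)).length ≤ t.length := by
      simp [List.length_drop]; omega
    rw [h2, go_spec old new hold t.length _ _ hd, ← replace_eq_go old new hold]
    simp
  · rw [if_neg hp]
    have h2 : PySem.Chars.replace.go old new (c::t).length (c::t) []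
        = PySem.Chars.replace.go old new t.length t [c] := by
      simp [PySem.Chars.replace.go, hp]
    rw [h2, go_spec old new hold t.length _ _ (le_refl _), ← replace_eq_go old new hold]
    simp

-- ---- suffix arithmetic ----

theorem suffix_short {k S p : List Char} (h : k <:+ S ++ p) (hl : k.length ≤ p.length) : k <:+ p := by
  rw [← List.reverse_prefix] at h ⊢
  rw [List.reverse_append] at h
  exact List.prefix_of_prefix_length_le h (List.prefix_append _ _) (by simpa using hl)

theorem suffix_long {k S p : List Char} (h : k <:+ S ++ p) (hl : p.length ≤ k.length) : p <:+ k := by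
  rw [← List.reverse_prefix] at h ⊢
  rw [List.reverse_append] at h
  exact List.prefix_of_prefix_length_le (List.prefix_append _ _) h (by simpa using hl)

theorem not_suffix_append_of {k p : List Char} (S : List Char)
    (h1 : ¬ k <:+ p) (h2 : ¬ p <:+ k) : ¬ k <:+ (S ++ p) := by
  intro h
  rcases Nat.lt_or_ge p.length k.length with hl | hl
  · exact h2 (suffix_long h (le_of_lt hl))
  · exact h1 (suffix_short h hl)

-- ---- redStep / reduceAll rewriting ----

theorem redStep_skip {tbl : List (List Char × List Char)} {k v : List Char} {s : List Char}
    (h : ¬ k <:+ s) : redStep ((k, v) :: tbl) s = redStep tbl s := by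
  have : ¬ (k.isSuffixOf s = true) := by rw [List.isSuffixOf_iff_suffix]; exact h
  simp [redStep, this]

theorem redStep_hit {tbl : List (List Char × List Char)} {k v : List Char} {s : List Char}
    (h : k <:+ s) : redStep ((k, v) :: tbl) s = some (s.take (s.length - k.length) ++ v) := by
  have : k.isSuffixOf s = true := List.isSuffixOf_iff_suffix.mpr h
  simp [redStep, this]

theorem redStep_eq_none {tbl : List (List Char × List Char)} {s : List Char}
    (h : ∀ kv ∈ tbl, ¬ kv.1 <:+ s) : redStep tbl s = none := by
  induction tbl with
  | nil => rfl
  | cons kv rest ih =>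
    obtain ⟨k, v⟩ := kv
    rw [redStep_skip (h (k, v) (by simp))]
    exact ih (fun kv hkv => h kv (List.mem_cons_of_mem _ hkv))

theorem reduceAll_of_none {s : List Char} (h : redStep pvTable s = none) : reduceAll s = s := by
  conv_lhs => rw [reduceAll.eq_def]
  split
  · rfl
  · next t ht => rw [h] at ht; cases ht

theorem reduceAll_of_step {s t : List Char} (h : redStep pvTable s = some t) :
    reduceAll s = reduceAll t := by
  conv_lhs => rw [reduceAll.eq_def]
  split
  · next hn => rw [h] at hn; cases hn
  · next u hu => rw [h] at hu; cases hu; rfl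

theorem red_none (p : List Char)
    (hp : ∀ kv ∈ pvTable, ¬ kv.1 <:+ p ∧ ¬ p <:+ kv.1) (S : List Char) :
    redStep pvTable (S ++ p) = none :=
  redStep_eq_none (fun kv hkv => not_suffix_append_of S (hp kv hkv).1 (hp kv hkv).2)

-- ---- the stack fold ----

def push (S : List Char) (c : Char) : List Char := reduceAll (S ++ [c])

def nf (S s : List Char) : List Char := s.foldl push S

-- ---- per-key facts: reducing exactly at a completed key ----

theorem stepKey1 (S : List Char) : redStep pvTable (S ++ ['\\', 'x', 'e', '0']) = some (S ++ ['à']) := by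
  simp only [pvTable]
  rw [redStep_hit (List.suffix_append S _)]
  rw [show (S ++ ['\\', 'x', 'e', '0']).length - (['\\', 'x', 'e', '0'] : List Char).length = S.length by simp, List.take_left]
theorem stepKey2 (S : List Char) : redStep pvTable (S ++ ['\\', 'x', 'e', '9']) = some (S ++ ['é']) := by
  simp only [pvTable]
  rw [redStep_skip (not_suffix_append_of S (by decide) (by decide))]
  rw [redStep_hit (List.suffix_append S _)]
  rw [show (S ++ ['\\', 'x', 'e', '9']).length - (['\\', 'x', 'e', '9'] : List Char).length = S.length by simp, List.take_left]
theorem stepKey3 (S : List Char) : redStep pvTable (S ++ ['\\', 'x', 'e', '8']) = some (S ++ ['è']) := by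
  simp only [pvTable]
  rw [redStep_skip (not_suffix_append_of S (by decide) (by decide))]
  rw [redStep_skip (not_suffix_append_of S (by decide) (by decide))]
  rw [redStep_hit (List.suffix_append S _)]
  rw [show (S ++ ['\\', 'x', 'e', '8']).length - (['\\', 'x', 'e', '8'] : List Char).length = S.length by simp, List.take_left]
theorem stepKey4 (S : List Char) : redStep pvTable (S ++ ['\\', 'x', 'e', '7']) = some (S ++ ['ç']) := by
  simp only [pvTable]
  rw [redStep_skip (not_suffix_append_of S (by decide) (by decide))]
  rw [redStep_skip (not_suffix_append_of S (by decide) (by decide))]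
  rw [redStep_skip (not_suffix_append_of S (by decide) (by decide))]
  rw [redStep_hit (List.suffix_append S _)]
  rw [show (S ++ ['\\', 'x', 'e', '7']).length - (['\\', 'x', 'e', '7'] : List Char).length = S.length by simp, List.take_left]
theorem stepKey5 (S : List Char) : redStep pvTable (S ++ ['\\', 'x', 'f', '4']) = some (S ++ ['ô']) := by
  simp only [pvTable]
  rw [redStep_skip (not_suffix_append_of S (by decide) (by decide))]
  rw [redStep_skip (not_suffix_append_of S (by decide) (by decide))]
  rw [redStep_skip (not_suffix_append_of S (by decide) (by decide))]
  rw [redStep_skip (not_suffix_append_of S (by decide) (by decide))]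
  rw [redStep_hit (List.suffix_append S _)]
  rw [show (S ++ ['\\', 'x', 'f', '4']).length - (['\\', 'x', 'f', '4'] : List Char).length = S.length by simp, List.take_left]
theorem stepKey6 (S : List Char) : redStep pvTable (S ++ ['\\', 'x', 'e', 'a']) = some (S ++ ['ê']) := by
  simp only [pvTable]
  rw [redStep_skip (not_suffix_append_of S (by decide) (by decide))]
  rw [redStep_skip (not_suffix_append_of S (by decide) (by decide))]
  rw [redStep_skip (not_suffix_append_of S (by decide) (by decide))]
  rw [redStep_skip (not_suffix_append_of S (by decide) (by decide))]
  rw [redStep_skip (not_suffix_append_of S (by decide) (by decide))]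
  rw [redStep_hit (List.suffix_append S _)]
  rw [show (S ++ ['\\', 'x', 'e', 'a']).length - (['\\', 'x', 'e', 'a'] : List Char).length = S.length by simp, List.take_left]
theorem stepKey7 (S : List Char) : redStep pvTable (S ++ ['\\', '\'']) = some (S ++ ['\'']) := by
  simp only [pvTable]
  rw [redStep_skip (not_suffix_append_of S (by decide) (by decide))]
  rw [redStep_skip (not_suffix_append_of S (by decide) (by decide))]
  rw [redStep_skip (not_suffix_append_of S (by decide) (by decide))]
  rw [redStep_skip (not_suffix_append_of S (by decide) (by decide))]
  rw [redStep_skip (not_suffix_append_of S (by decide) (by decide))]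
  rw [redStep_skip (not_suffix_append_of S (by decide) (by decide))]
  rw [redStep_hit (List.suffix_append S _)]
  rw [show (S ++ ['\\', '\'']).length - (['\\', '\''] : List Char).length = S.length by simp, List.take_left]
theorem stepKey8 (S : List Char) : redStep pvTable (S ++ ['\\', 'x', 'e', '2']) = some (S ++ ['â']) := by
  simp only [pvTable]
  rw [redStep_skip (not_suffix_append_of S (by decide) (by decide))]
  rw [redStep_skip (not_suffix_append_of S (by decide) (by decide))]
  rw [redStep_skip (not_suffix_append_of S (by decide) (by decide))]
  rw [redStep_skip (not_suffix_append_of S (by decide) (by decide))]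
  rw [redStep_skip (not_suffix_append_of S (by decide) (by decide))]
  rw [redStep_skip (not_suffix_append_of S (by decide) (by decide))]
  rw [redStep_skip (not_suffix_append_of S (by decide) (by decide))]
  rw [redStep_hit (List.suffix_append S _)]
  rw [show (S ++ ['\\', 'x', 'e', '2']).length - (['\\', 'x', 'e', '2'] : List Char).length = S.length by simp, List.take_left]
theorem stepKey9 (S : List Char) : redStep pvTable (S ++ ['\\', 'x', 'f', 'b']) = some (S ++ ['û']) := by
  simp only [pvTable]
  rw [redStep_skip (not_suffix_append_of S (by decide) (by decide))]
  rw [redStep_skip (not_suffix_append_of S (by decide) (by decide))]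
  rw [redStep_skip (not_suffix_append_of S (by decide) (by decide))]
  rw [redStep_skip (not_suffix_append_of S (by decide) (by decide))]
  rw [redStep_skip (not_suffix_append_of S (by decide) (by decide))]
  rw [redStep_skip (not_suffix_append_of S (by decide) (by decide))]
  rw [redStep_skip (not_suffix_append_of S (by decide) (by decide))]
  rw [redStep_skip (not_suffix_append_of S (by decide) (by decide))]
  rw [redStep_hit (List.suffix_append S _)]
  rw [show (S ++ ['\\', 'x', 'f', 'b']).length - (['\\', 'x', 'f', 'b'] : List Char).length = S.length by simp, List.take_left]
theorem stepKey10 (S : List Char) : redStep pvTable (S ++ ['\\', 'x', 'c', 'a']) = some (S ++ ['É']) := by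
  simp only [pvTable]
  rw [redStep_skip (not_suffix_append_of S (by decide) (by decide))]
  rw [redStep_skip (not_suffix_append_of S (by decide) (by decide))]
  rw [redStep_skip (not_suffix_append_of S (by decide) (by decide))]
  rw [redStep_skip (not_suffix_append_of S (by decide) (by decide))]
  rw [redStep_skip (not_suffix_append_of S (by decide) (by decide))]
  rw [redStep_skip (not_suffix_append_of S (by decide) (by decide))]
  rw [redStep_skip (not_suffix_append_of S (by decide) (by decide))]
  rw [redStep_skip (not_suffix_append_of S (by decide) (by decide))]
  rw [redStep_skip (not_suffix_append_of S (by decide) (by decide))]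
  rw [redStep_hit (List.suffix_append S _)]
  rw [show (S ++ ['\\', 'x', 'c', 'a']).length - (['\\', 'x', 'c', 'a'] : List Char).length = S.length by simp, List.take_left]
theorem stepKey11 (S : List Char) : redStep pvTable (S ++ ['\\', 'x', 'c', '9']) = some (S ++ ['Ê']) := by
  simp only [pvTable]
  rw [redStep_skip (not_suffix_append_of S (by decide) (by decide))]
  rw [redStep_skip (not_suffix_append_of S (by decide) (by decide))]
  rw [redStep_skip (not_suffix_append_of S (by decide) (by decide))]
  rw [redStep_skip (not_suffix_append_of S (by decide) (by decide))]
  rw [redStep_skip (not_suffix_append_of S (by decide) (by decide))]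
  rw [redStep_skip (not_suffix_append_of S (by decide) (by decide))]
  rw [redStep_skip (not_suffix_append_of S (by decide) (by decide))]
  rw [redStep_skip (not_suffix_append_of S (by decide) (by decide))]
  rw [redStep_skip (not_suffix_append_of S (by decide) (by decide))]
  rw [redStep_skip (not_suffix_append_of S (by decide) (by decide))]
  rw [redStep_hit (List.suffix_append S _)]
  rw [show (S ++ ['\\', 'x', 'c', '9']).length - (['\\', 'x', 'c', '9'] : List Char).length = S.length by simp, List.take_left]
theorem stepKey12 (S : List Char) : redStep pvTable (S ++ ['\\', 'x', 'f', '9']) = some (S ++ ['ù']) := by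
  simp only [pvTable]
  rw [redStep_skip (not_suffix_append_of S (by decide) (by decide))]
  rw [redStep_skip (not_suffix_append_of S (by decide) (by decide))]
  rw [redStep_skip (not_suffix_append_of S (by decide) (by decide))]
  rw [redStep_skip (not_suffix_append_of S (by decide) (by decide))]
  rw [redStep_skip (not_suffix_append_of S (by decide) (by decide))]
  rw [redStep_skip (not_suffix_append_of S (by decide) (by decide))]
  rw [redStep_skip (not_suffix_append_of S (by decide) (by decide))]
  rw [redStep_skip (not_suffix_append_of S (by decide) (by decide))]
  rw [redStep_skip (not_suffix_append_of S (by decide) (by decide))]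
  rw [redStep_skip (not_suffix_append_of S (by decide) (by decide))]
  rw [redStep_skip (not_suffix_append_of S (by decide) (by decide))]
  rw [redStep_hit (List.suffix_append S _)]
  rw [show (S ++ ['\\', 'x', 'f', '9']).length - (['\\', 'x', 'f', '9'] : List Char).length = S.length by simp, List.take_left]
theorem stepKey13 (S : List Char) : redStep pvTable (S ++ ['\\', 'x', 'e', 'f']) = some (S ++ ['ï']) := by
  simp only [pvTable]
  rw [redStep_skip (not_suffix_append_of S (by decide) (by decide))]
  rw [redStep_skip (not_suffix_append_of S (by decide) (by decide))]
  rw [redStep_skip (not_suffix_append_of S (by decide) (by decide))]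
  rw [redStep_skip (not_suffix_append_of S (by decide) (by decide))]
  rw [redStep_skip (not_suffix_append_of S (by decide) (by decide))]
  rw [redStep_skip (not_suffix_append_of S (by decide) (by decide))]
  rw [redStep_skip (not_suffix_append_of S (by decide) (by decide))]
  rw [redStep_skip (not_suffix_append_of S (by decide) (by decide))]
  rw [redStep_skip (not_suffix_append_of S (by decide) (by decide))]
  rw [redStep_skip (not_suffix_append_of S (by decide) (by decide))]
  rw [redStep_skip (not_suffix_append_of S (by decide) (by decide))]
  rw [redStep_skip (not_suffix_append_of S (by decide) (by decide))]
  rw [redStep_hit (List.suffix_append S _)]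
  rw [show (S ++ ['\\', 'x', 'e', 'f']).length - (['\\', 'x', 'e', 'f'] : List Char).length = S.length by simp, List.take_left]
theorem stepKey14 (S : List Char) : redStep pvTable (S ++ ['\\', 'x', 'e', 'e']) = some (S ++ ['i']) := by
  simp only [pvTable]
  rw [redStep_skip (not_suffix_append_of S (by decide) (by decide))]
  rw [redStep_skip (not_suffix_append_of S (by decide) (by decide))]
  rw [redStep_skip (not_suffix_append_of S (by decide) (by decide))]
  rw [redStep_skip (not_suffix_append_of S (by decide) (by decide))]
  rw [redStep_skip (not_suffix_append_of S (by decide) (by decide))]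
  rw [redStep_skip (not_suffix_append_of S (by decide) (by decide))]
  rw [redStep_skip (not_suffix_append_of S (by decide) (by decide))]
  rw [redStep_skip (not_suffix_append_of S (by decide) (by decide))]
  rw [redStep_skip (not_suffix_append_of S (by decide) (by decide))]
  rw [redStep_skip (not_suffix_append_of S (by decide) (by decide))]
  rw [redStep_skip (not_suffix_append_of S (by decide) (by decide))]
  rw [redStep_skip (not_suffix_append_of S (by decide) (by decide))]
  rw [redStep_skip (not_suffix_append_of S (by decide) (by decide))]
  rw [redStep_hit (List.suffix_append S _)]
  rw [show (S ++ ['\\', 'x', 'e', 'e']).length - (['\\', 'x', 'e', 'e'] : List Char).length = S.length by simp, List.take_left]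

theorem foldKey1 (S : List Char) : List.foldl push S ['\\', 'x', 'e', '0'] = reduceAll (S ++ ['à']) := by
  simp only [List.foldl]
  rw [show push S '\\' = S ++ ['\\'] from reduceAll_of_none (red_none ['\\'] (by decide) S)]
  rw [show push (S ++ ['\\']) 'x' = S ++ ['\\', 'x'] from by
    unfold push
    rw [List.append_assoc]
    simp only [List.cons_append, List.nil_append]
    exact reduceAll_of_none (red_none ['\\', 'x'] (by decide) S)]
  rw [show push (S ++ ['\\', 'x']) 'e' = S ++ ['\\', 'x', 'e'] from by
    unfold push
    rw [List.append_assoc]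
    simp only [List.cons_append, List.nil_append]
    exact reduceAll_of_none (red_none ['\\', 'x', 'e'] (by decide) S)]
  unfold push
  rw [List.append_assoc]
  simp only [List.cons_append, List.nil_append]
  exact reduceAll_of_step (stepKey1 S)
theorem foldKey2 (S : List Char) : List.foldl push S ['\\', 'x', 'e', '9'] = reduceAll (S ++ ['é']) := by
  simp only [List.foldl]
  rw [show push S '\\' = S ++ ['\\'] from reduceAll_of_none (red_none ['\\'] (by decide) S)]
  rw [show push (S ++ ['\\']) 'x' = S ++ ['\\', 'x'] from by
    unfold push
    rw [List.append_assoc]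
    simp only [List.cons_append, List.nil_append]
    exact reduceAll_of_none (red_none ['\\', 'x'] (by decide) S)]
  rw [show push (S ++ ['\\', 'x']) 'e' = S ++ ['\\', 'x', 'e'] from by
    unfold push
    rw [List.append_assoc]
    simp only [List.cons_append, List.nil_append]
    exact reduceAll_of_none (red_none ['\\', 'x', 'e'] (by decide) S)]
  unfold push
  rw [List.append_assoc]
  simp only [List.cons_append, List.nil_append]
  exact reduceAll_of_step (stepKey2 S)
theorem foldKey3 (S : List Char) : List.foldl push S ['\\', 'x', 'e', '8'] = reduceAll (S ++ ['è']) := by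
  simp only [List.foldl]
  rw [show push S '\\' = S ++ ['\\'] from reduceAll_of_none (red_none ['\\'] (by decide) S)]
  rw [show push (S ++ ['\\']) 'x' = S ++ ['\\', 'x'] from by
    unfold push
    rw [List.append_assoc]
    simp only [List.cons_append, List.nil_append]
    exact reduceAll_of_none (red_none ['\\', 'x'] (by decide) S)]
  rw [show push (S ++ ['\\', 'x']) 'e' = S ++ ['\\', 'x', 'e'] from by
    unfold push
    rw [List.append_assoc]
    simp only [List.cons_append, List.nil_append]
    exact reduceAll_of_none (red_none ['\\', 'x', 'e'] (by decide) S)]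
  unfold push
  rw [List.append_assoc]
  simp only [List.cons_append, List.nil_append]
  exact reduceAll_of_step (stepKey3 S)
theorem foldKey4 (S : List Char) : List.foldl push S ['\\', 'x', 'e', '7'] = reduceAll (S ++ ['ç']) := by
  simp only [List.foldl]
  rw [show push S '\\' = S ++ ['\\'] from reduceAll_of_none (red_none ['\\'] (by decide) S)]
  rw [show push (S ++ ['\\']) 'x' = S ++ ['\\', 'x'] from by
    unfold push
    rw [List.append_assoc]
    simp only [List.cons_append, List.nil_append]
    exact reduceAll_of_none (red_none ['\\', 'x'] (by decide) S)]
  rw [show push (S ++ ['\\', 'x']) 'e' = S ++ ['\\', 'x', 'e'] from by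
    unfold push
    rw [List.append_assoc]
    simp only [List.cons_append, List.nil_append]
    exact reduceAll_of_none (red_none ['\\', 'x', 'e'] (by decide) S)]
  unfold push
  rw [List.append_assoc]
  simp only [List.cons_append, List.nil_append]
  exact reduceAll_of_step (stepKey4 S)
theorem foldKey5 (S : List Char) : List.foldl push S ['\\', 'x', 'f', '4'] = reduceAll (S ++ ['ô']) := by
  simp only [List.foldl]
  rw [show push S '\\' = S ++ ['\\'] from reduceAll_of_none (red_none ['\\'] (by decide) S)]
  rw [show push (S ++ ['\\']) 'x' = S ++ ['\\', 'x'] from by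
    unfold push
    rw [List.append_assoc]
    simp only [List.cons_append, List.nil_append]
    exact reduceAll_of_none (red_none ['\\', 'x'] (by decide) S)]
  rw [show push (S ++ ['\\', 'x']) 'f' = S ++ ['\\', 'x', 'f'] from by
    unfold push
    rw [List.append_assoc]
    simp only [List.cons_append, List.nil_append]
    exact reduceAll_of_none (red_none ['\\', 'x', 'f'] (by decide) S)]
  unfold push
  rw [List.append_assoc]
  simp only [List.cons_append, List.nil_append]
  exact reduceAll_of_step (stepKey5 S)
theorem foldKey6 (S : List Char) : List.foldl push S ['\\', 'x', 'e', 'a'] = reduceAll (S ++ ['ê']) := by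
  simp only [List.foldl]
  rw [show push S '\\' = S ++ ['\\'] from reduceAll_of_none (red_none ['\\'] (by decide) S)]
  rw [show push (S ++ ['\\']) 'x' = S ++ ['\\', 'x'] from by
    unfold push
    rw [List.append_assoc]
    simp only [List.cons_append, List.nil_append]
    exact reduceAll_of_none (red_none ['\\', 'x'] (by decide) S)]
  rw [show push (S ++ ['\\', 'x']) 'e' = S ++ ['\\', 'x', 'e'] from by
    unfold push
    rw [List.append_assoc]
    simp only [List.cons_append, List.nil_append]
    exact reduceAll_of_none (red_none ['\\', 'x', 'e'] (by decide) S)]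
  unfold push
  rw [List.append_assoc]
  simp only [List.cons_append, List.nil_append]
  exact reduceAll_of_step (stepKey6 S)
theorem foldKey7 (S : List Char) : List.foldl push S ['\\', '\''] = reduceAll (S ++ ['\'']) := by
  simp only [List.foldl]
  rw [show push S '\\' = S ++ ['\\'] from reduceAll_of_none (red_none ['\\'] (by decide) S)]
  unfold push
  rw [List.append_assoc]
  simp only [List.cons_append, List.nil_append]
  exact reduceAll_of_step (stepKey7 S)
theorem foldKey8 (S : List Char) : List.foldl push S ['\\', 'x', 'e', '2'] = reduceAll (S ++ ['â']) := by
  simp only [List.foldl]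
  rw [show push S '\\' = S ++ ['\\'] from reduceAll_of_none (red_none ['\\'] (by decide) S)]
  rw [show push (S ++ ['\\']) 'x' = S ++ ['\\', 'x'] from by
    unfold push
    rw [List.append_assoc]
    simp only [List.cons_append, List.nil_append]
    exact reduceAll_of_none (red_none ['\\', 'x'] (by decide) S)]
  rw [show push (S ++ ['\\', 'x']) 'e' = S ++ ['\\', 'x', 'e'] from by
    unfold push
    rw [List.append_assoc]
    simp only [List.cons_append, List.nil_append]
    exact reduceAll_of_none (red_none ['\\', 'x', 'e'] (by decide) S)]
  unfold push
  rw [List.append_assoc]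
  simp only [List.cons_append, List.nil_append]
  exact reduceAll_of_step (stepKey8 S)
theorem foldKey9 (S : List Char) : List.foldl push S ['\\', 'x', 'f', 'b'] = reduceAll (S ++ ['û']) := by
  simp only [List.foldl]
  rw [show push S '\\' = S ++ ['\\'] from reduceAll_of_none (red_none ['\\'] (by decide) S)]
  rw [show push (S ++ ['\\']) 'x' = S ++ ['\\', 'x'] from by
    unfold push
    rw [List.append_assoc]
    simp only [List.cons_append, List.nil_append]
    exact reduceAll_of_none (red_none ['\\', 'x'] (by decide) S)]
  rw [show push (S ++ ['\\', 'x']) 'f' = S ++ ['\\', 'x', 'f'] from by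
    unfold push
    rw [List.append_assoc]
    simp only [List.cons_append, List.nil_append]
    exact reduceAll_of_none (red_none ['\\', 'x', 'f'] (by decide) S)]
  unfold push
  rw [List.append_assoc]
  simp only [List.cons_append, List.nil_append]
  exact reduceAll_of_step (stepKey9 S)
theorem foldKey10 (S : List Char) : List.foldl push S ['\\', 'x', 'c', 'a'] = reduceAll (S ++ ['É']) := by
  simp only [List.foldl]
  rw [show push S '\\' = S ++ ['\\'] from reduceAll_of_none (red_none ['\\'] (by decide) S)]
  rw [show push (S ++ ['\\']) 'x' = S ++ ['\\', 'x'] from by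
    unfold push
    rw [List.append_assoc]
    simp only [List.cons_append, List.nil_append]
    exact reduceAll_of_none (red_none ['\\', 'x'] (by decide) S)]
  rw [show push (S ++ ['\\', 'x']) 'c' = S ++ ['\\', 'x', 'c'] from by
    unfold push
    rw [List.append_assoc]
    simp only [List.cons_append, List.nil_append]
    exact reduceAll_of_none (red_none ['\\', 'x', 'c'] (by decide) S)]
  unfold push
  rw [List.append_assoc]
  simp only [List.cons_append, List.nil_append]
  exact reduceAll_of_step (stepKey10 S)
theorem foldKey11 (S : List Char) : List.foldl push S ['\\', 'x', 'c', '9'] = reduceAll (S ++ ['Ê']) := by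
  simp only [List.foldl]
  rw [show push S '\\' = S ++ ['\\'] from reduceAll_of_none (red_none ['\\'] (by decide) S)]
  rw [show push (S ++ ['\\']) 'x' = S ++ ['\\', 'x'] from by
    unfold push
    rw [List.append_assoc]
    simp only [List.cons_append, List.nil_append]
    exact reduceAll_of_none (red_none ['\\', 'x'] (by decide) S)]
  rw [show push (S ++ ['\\', 'x']) 'c' = S ++ ['\\', 'x', 'c'] from by
    unfold push
    rw [List.append_assoc]
    simp only [List.cons_append, List.nil_append]
    exact reduceAll_of_none (red_none ['\\', 'x', 'c'] (by decide) S)]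
  unfold push
  rw [List.append_assoc]
  simp only [List.cons_append, List.nil_append]
  exact reduceAll_of_step (stepKey11 S)
theorem foldKey12 (S : List Char) : List.foldl push S ['\\', 'x', 'f', '9'] = reduceAll (S ++ ['ù']) := by
  simp only [List.foldl]
  rw [show push S '\\' = S ++ ['\\'] from reduceAll_of_none (red_none ['\\'] (by decide) S)]
  rw [show push (S ++ ['\\']) 'x' = S ++ ['\\', 'x'] from by
    unfold push
    rw [List.append_assoc]
    simp only [List.cons_append, List.nil_append]
    exact reduceAll_of_none (red_none ['\\', 'x'] (by decide) S)]
  rw [show push (S ++ ['\\', 'x']) 'f' = S ++ ['\\', 'x', 'f'] from by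
    unfold push
    rw [List.append_assoc]
    simp only [List.cons_append, List.nil_append]
    exact reduceAll_of_none (red_none ['\\', 'x', 'f'] (by decide) S)]
  unfold push
  rw [List.append_assoc]
  simp only [List.cons_append, List.nil_append]
  exact reduceAll_of_step (stepKey12 S)
theorem foldKey13 (S : List Char) : List.foldl push S ['\\', 'x', 'e', 'f'] = reduceAll (S ++ ['ï']) := by
  simp only [List.foldl]
  rw [show push S '\\' = S ++ ['\\'] from reduceAll_of_none (red_none ['\\'] (by decide) S)]
  rw [show push (S ++ ['\\']) 'x' = S ++ ['\\', 'x'] from by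
    unfold push
    rw [List.append_assoc]
    simp only [List.cons_append, List.nil_append]
    exact reduceAll_of_none (red_none ['\\', 'x'] (by decide) S)]
  rw [show push (S ++ ['\\', 'x']) 'e' = S ++ ['\\', 'x', 'e'] from by
    unfold push
    rw [List.append_assoc]
    simp only [List.cons_append, List.nil_append]
    exact reduceAll_of_none (red_none ['\\', 'x', 'e'] (by decide) S)]
  unfold push
  rw [List.append_assoc]
  simp only [List.cons_append, List.nil_append]
  exact reduceAll_of_step (stepKey13 S)
theorem foldKey14 (S : List Char) : List.foldl push S ['\\', 'x', 'e', 'e'] = reduceAll (S ++ ['i']) := by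
  simp only [List.foldl]
  rw [show push S '\\' = S ++ ['\\'] from reduceAll_of_none (red_none ['\\'] (by decide) S)]
  rw [show push (S ++ ['\\']) 'x' = S ++ ['\\', 'x'] from by
    unfold push
    rw [List.append_assoc]
    simp only [List.cons_append, List.nil_append]
    exact reduceAll_of_none (red_none ['\\', 'x'] (by decide) S)]
  rw [show push (S ++ ['\\', 'x']) 'e' = S ++ ['\\', 'x', 'e'] from by
    unfold push
    rw [List.append_assoc]
    simp only [List.cons_append, List.nil_append]
    exact reduceAll_of_none (red_none ['\\', 'x', 'e'] (by decide) S)]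
  unfold push
  rw [List.append_assoc]
  simp only [List.cons_append, List.nil_append]
  exact reduceAll_of_step (stepKey14 S)

-- ---- pushing a whole replace output equals pushing the source (per key) ----

theorem f5 {k v : List Char} (hk : k ≠ []) (hv : v.length = 1)
    (hkey : ∀ S, List.foldl push S k = reduceAll (S ++ v)) :
    ∀ n (s S : List Char), s.length ≤ n → nf S (PySem.Chars.replace s k v) = nf S s := by
  intro n
  induction n with
  | zero =>
    intro s S hs
    have hnil : s = [] := List.eq_nil_iff_length_eq_zero.mpr (by omega)
    subst hnil
    rw [replace_nil k v hk]
  | succ m ih =>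
    intro s S hs
    cases s with
    | nil => rw [replace_nil k v hk]
    | cons c t =>
      rw [replace_cons k v hk c t]
      by_cases hp : k.isPrefixOf (c :: t)
      · rw [if_pos hp]
        obtain ⟨r, hr⟩ := List.isPrefixOf_iff_prefix.mp hp
        rw [← hr] at hs ⊢
        rw [List.drop_left]
        unfold nf
        rw [List.foldl_append, List.foldl_append, hkey S]
        have hfv : List.foldl push S v = reduceAll (S ++ v) := by
          obtain ⟨vc, rfl⟩ : ∃ vc, v = [vc] := by
            cases v with
            | nil => simp at hv
            | cons a u => cases u with
              | nil => exact ⟨a, rfl⟩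
              | cons b w => simp at hv
          simp [List.foldl, push]
        rw [hfv]
        have hkl : 0 < k.length := List.length_pos_iff.mpr hk
        have hrlen : r.length ≤ m := by
          simp only [List.length_append] at hs
          omega
        exact ih r (reduceAll (S ++ v)) hrlen
      · rw [if_neg hp]
        show nf (push S c) (PySem.Chars.replace t k v) = nf (push S c) t
        exact ih t (push S c) (by simp only [List.length_cons] at hs; omega)

theorem nfR1 (w S : List Char) : nf S (PySem.Chars.replace w ['\\', 'x', 'e', '0'] ['à']) = nf S w :=
  f5 (by decide) (by decide) foldKey1 w.length w S (le_refl _)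
theorem nfR2 (w S : List Char) : nf S (PySem.Chars.replace w ['\\', 'x', 'e', '9'] ['é']) = nf S w :=
  f5 (by decide) (by decide) foldKey2 w.length w S (le_refl _)
theorem nfR3 (w S : List Char) : nf S (PySem.Chars.replace w ['\\', 'x', 'e', '8'] ['è']) = nf S w :=
  f5 (by decide) (by decide) foldKey3 w.length w S (le_refl _)
theorem nfR4 (w S : List Char) : nf S (PySem.Chars.replace w ['\\', 'x', 'e', '7'] ['ç']) = nf S w :=
  f5 (by decide) (by decide) foldKey4 w.length w S (le_refl _)
theorem nfR5 (w S : List Char) : nf S (PySem.Chars.replace w ['\\', 'x', 'f', '4'] ['ô']) = nf S w :=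
  f5 (by decide) (by decide) foldKey5 w.length w S (le_refl _)
theorem nfR6 (w S : List Char) : nf S (PySem.Chars.replace w ['\\', 'x', 'e', 'a'] ['ê']) = nf S w :=
  f5 (by decide) (by decide) foldKey6 w.length w S (le_refl _)
theorem nfR7 (w S : List Char) : nf S (PySem.Chars.replace w ['\\', '\''] ['\'']) = nf S w :=
  f5 (by decide) (by decide) foldKey7 w.length w S (le_refl _)
theorem nfR8 (w S : List Char) : nf S (PySem.Chars.replace w ['\\', 'x', 'e', '2'] ['â']) = nf S w :=
  f5 (by decide) (by decide) foldKey8 w.length w S (le_refl _)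
theorem nfR9 (w S : List Char) : nf S (PySem.Chars.replace w ['\\', 'x', 'f', 'b'] ['û']) = nf S w :=
  f5 (by decide) (by decide) foldKey9 w.length w S (le_refl _)
theorem nfR10 (w S : List Char) : nf S (PySem.Chars.replace w ['\\', 'x', 'c', 'a'] ['É']) = nf S w :=
  f5 (by decide) (by decide) foldKey10 w.length w S (le_refl _)
theorem nfR11 (w S : List Char) : nf S (PySem.Chars.replace w ['\\', 'x', 'c', '9'] ['Ê']) = nf S w :=
  f5 (by decide) (by decide) foldKey11 w.length w S (le_refl _)
theorem nfR12 (w S : List Char) : nf S (PySem.Chars.replace w ['\\', 'x', 'f', '9'] ['ù']) = nf S w :=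
  f5 (by decide) (by decide) foldKey12 w.length w S (le_refl _)
theorem nfR13 (w S : List Char) : nf S (PySem.Chars.replace w ['\\', 'x', 'e', 'f'] ['ï']) = nf S w :=
  f5 (by decide) (by decide) foldKey13 w.length w S (le_refl _)
theorem nfR14 (w S : List Char) : nf S (PySem.Chars.replace w ['\\', 'x', 'e', 'e'] ['i']) = nf S w :=
  f5 (by decide) (by decide) foldKey14 w.length w S (le_refl _)

-- ---- A's pass, on the character-list side ----

def passL (s : List Char) : List Char :=
  pvTable.foldl (fun s kv => PySem.Chars.replace s kv.1 kv.2) s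

set_option maxHeartbeats 1000000 in
theorem nf_pass (s S : List Char) : nf S (passL s) = nf S s := by
  simp only [passL, pvTable, List.foldl]
  rw [nfR14, nfR13, nfR12, nfR11, nfR10, nfR9, nfR8, nfR7, nfR6, nfR5, nfR4, nfR3, nfR2, nfR1]

set_option maxHeartbeats 1000000 in
set_option maxRecDepth 8192 in
theorem nf_aiter (l : List Char) : ∀ (s S : List Char),
    nf S (l.foldl (fun acc _ => passL acc) s) = nf S s := by
  induction l with
  | nil => intro s S; rfl
  | cons c t ih =>
    intro s S
    rw [List.foldl_cons]
    exact (ih (passL s) S).trans (by rw [nf_pass])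

-- ---- lengths and the fixed point of A's pass ----

theorem replace_length_le {k v : List Char} (hk : k ≠ []) (hv : v.length ≤ k.length) :
    ∀ n (s : List Char), s.length ≤ n → (PySem.Chars.replace s k v).length ≤ s.length := by
  intro n
  induction n with
  | zero =>
    intro s hs
    have hnil : s = [] := List.eq_nil_iff_length_eq_zero.mpr (by omega)
    subst hnil; rw [replace_nil k v hk]
  | succ m ih =>
    intro s hs
    cases s with
    | nil => rw [replace_nil k v hk]
    | cons c t =>
      rw [replace_cons k v hk c t]
      by_cases hp : k.isPrefixOf (c :: t)
      · rw [if_pos hp]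
        obtain ⟨r, hr⟩ := List.isPrefixOf_iff_prefix.mp hp
        rw [← hr] at hs ⊢
        rw [List.drop_left]
        have hkl : 0 < k.length := List.length_pos_iff.mpr hk
        have h1 : (PySem.Chars.replace r k v).length ≤ r.length := by
          apply ih
          simp only [List.length_append] at hs
          omega
        simp only [List.length_append]
        omega
      · rw [if_neg hp]
        have h1 : (PySem.Chars.replace t k v).length ≤ t.length := by
          apply ih
          simp only [List.length_cons] at hs
          omega
        simp only [List.length_cons]
        omega

theorem replace_dich {k v : List Char} (hk : k ≠ []) (hv : v.length < k.length) :
    ∀ n (s : List Char), s.length ≤ n →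
      PySem.Chars.replace s k v = s ∨ (PySem.Chars.replace s k v).length < s.length := by
  intro n
  induction n with
  | zero =>
    intro s hs
    have hnil : s = [] := List.eq_nil_iff_length_eq_zero.mpr (by omega)
    subst hnil; left; rw [replace_nil k v hk]
  | succ m ih =>
    intro s hs
    cases s with
    | nil => left; rw [replace_nil k v hk]
    | cons c t =>
      rw [replace_cons k v hk c t]
      by_cases hp : k.isPrefixOf (c :: t)
      · rw [if_pos hp]
        right
        obtain ⟨r, hr⟩ := List.isPrefixOf_iff_prefix.mp hp
        rw [← hr]
        rw [List.drop_left]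
        have hkl : 0 < k.length := List.length_pos_iff.mpr hk
        have h1 : (PySem.Chars.replace r k v).length ≤ r.length :=
          replace_length_le hk (le_of_lt hv) r.length r (le_refl _)
        simp only [List.length_append]
        omega
      · rw [if_neg hp]
        rcases ih t (by simp only [List.length_cons] at hs; omega) with h | h
        · left; rw [h]
        · right; simp only [List.length_cons]; omega

theorem replace_lt_of_infix {k v : List Char} (hk : k ≠ []) (hv : v.length < k.length) :
    ∀ n (s : List Char), s.length ≤ n → k <:+: s →
      (PySem.Chars.replace s k v).length < s.length := by
  intro n
  induction n with
  | zero =>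
    intro s hs hinf
    have hnil : s = [] := List.eq_nil_iff_length_eq_zero.mpr (by omega)
    subst hnil
    exact absurd (List.eq_nil_of_infix_nil hinf) hk
  | succ m ih =>
    intro s hs hinf
    cases s with
    | nil => exact absurd (List.eq_nil_of_infix_nil hinf) hk
    | cons c t =>
      rw [replace_cons k v hk c t]
      by_cases hp : k.isPrefixOf (c :: t)
      · rw [if_pos hp]
        obtain ⟨r, hr⟩ := List.isPrefixOf_iff_prefix.mp hp
        rw [← hr]
        rw [List.drop_left]
        have hkl : 0 < k.length := List.length_pos_iff.mpr hk
        have h1 : (PySem.Chars.replace r k v).length ≤ r.length :=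
          replace_length_le hk (le_of_lt hv) r.length r (le_refl _)
        simp only [List.length_append]
        omega
      · rw [if_neg hp]
        have hit : k <:+: t := by
          rcases List.infix_cons_iff.mp hinf with h | h
          · exact absurd (List.isPrefixOf_iff_prefix.mpr h) hp
          · exact h
        have h1 := ih t (by simp only [List.length_cons] at hs; omega) hit
        simp only [List.length_cons]
        omega

theorem table_sound : ∀ kv ∈ pvTable, kv.1 ≠ [] ∧ kv.2.length < kv.1.length := by decide

-- ---- generic facts about a fold of replaces over a table ----

theorem foldl_replace_length_le :
    ∀ (tbl : List (List Char × List Char)),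
      (∀ kv ∈ tbl, kv.1 ≠ [] ∧ kv.2.length < kv.1.length) →
      ∀ s : List Char,
        (tbl.foldl (fun s kv => PySem.Chars.replace s kv.1 kv.2) s).length ≤ s.length := by
  intro tbl
  induction tbl with
  | nil => intro _ s; exact le_refl _
  | cons kv rest ih =>
    intro h s
    have hkv := h kv (by simp)
    have h1 : (PySem.Chars.replace s kv.1 kv.2).length ≤ s.length :=
      replace_length_le hkv.1 (le_of_lt hkv.2) s.length s (le_refl _)
    calc (((kv :: rest).foldl (fun s kv => PySem.Chars.replace s kv.1 kv.2) s)).length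
        = ((rest.foldl (fun s kv => PySem.Chars.replace s kv.1 kv.2)
            (PySem.Chars.replace s kv.1 kv.2))).length := rfl
      _ ≤ (PySem.Chars.replace s kv.1 kv.2).length := ih (fun kv hkv => h kv (List.mem_cons_of_mem _ hkv)) _
      _ ≤ s.length := h1

theorem foldl_replace_dich :
    ∀ (tbl : List (List Char × List Char)),
      (∀ kv ∈ tbl, kv.1 ≠ [] ∧ kv.2.length < kv.1.length) →
      ∀ s : List Char,
        tbl.foldl (fun s kv => PySem.Chars.replace s kv.1 kv.2) s = s ∨
        (tbl.foldl (fun s kv => PySem.Chars.replace s kv.1 kv.2) s).length < s.length := by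
  intro tbl
  induction tbl with
  | nil => intro _ s; left; rfl
  | cons kv rest ih =>
    intro h s
    have hkv := h kv (by simp)
    have hrest := ih (fun kv hkv => h kv (List.mem_cons_of_mem _ hkv))
    have hfoldcons : (kv :: rest).foldl (fun s kv => PySem.Chars.replace s kv.1 kv.2) s
        = rest.foldl (fun s kv => PySem.Chars.replace s kv.1 kv.2)
            (PySem.Chars.replace s kv.1 kv.2) := rfl
    rcases replace_dich hkv.1 hkv.2 s.length s (le_refl _) with h1 | h1
    · rw [hfoldcons, h1]
      exact hrest s
    · right
      rw [hfoldcons]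
      have h2 := foldl_replace_length_le rest
        (fun kv hkv => h kv (List.mem_cons_of_mem _ hkv)) (PySem.Chars.replace s kv.1 kv.2)
      omega

theorem foldl_replace_fix :
    ∀ (tbl : List (List Char × List Char)),
      (∀ kv ∈ tbl, kv.1 ≠ [] ∧ kv.2.length < kv.1.length) →
      ∀ s : List Char,
        tbl.foldl (fun s kv => PySem.Chars.replace s kv.1 kv.2) s = s →
        ∀ kv ∈ tbl, ¬ kv.1 <:+: s := by
  intro tbl
  induction tbl with
  | nil => intro _ s _ kv hkv; cases hkv
  | cons kv0 rest ih =>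
    intro h s hfix
    have hkv0 := h kv0 (by simp)
    have hrest₀ : ∀ kv ∈ rest, kv.1 ≠ [] ∧ kv.2.length < kv.1.length :=
      fun kv hkv => h kv (List.mem_cons_of_mem _ hkv)
    -- the head replace must be the identity on s
    have hstep : PySem.Chars.replace s kv0.1 kv0.2 = s := by
      rcases replace_dich hkv0.1 hkv0.2 s.length s (le_refl _) with h1 | h1
      · exact h1
      · exfalso
        have h2 := foldl_replace_length_le rest hrest₀ (PySem.Chars.replace s kv0.1 kv0.2)
        have h3 : (rest.foldl (fun s kv => PySem.Chars.replace s kv.1 kv.2)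
            (PySem.Chars.replace s kv0.1 kv0.2)) = s := hfix
        rw [h3] at h2
        omega
    have hfix' : rest.foldl (fun s kv => PySem.Chars.replace s kv.1 kv.2) s = s := by
      have h3 : rest.foldl (fun s kv => PySem.Chars.replace s kv.1 kv.2)
          (PySem.Chars.replace s kv0.1 kv0.2) = s := hfix
      rw [hstep] at h3
      exact h3
    intro kv hkv
    rcases List.mem_cons.mp hkv with rfl | hkv'
    · intro hinf
      have := replace_lt_of_infix hkv0.1 hkv0.2 s.length s (le_refl _) hinf
      rw [hstep] at this
      omega
    · exact ih hrest₀ s hfix' kv hkv'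

-- ---- A's loop reaches the fixed point of its pass ----

theorem passL_dich (s : List Char) : passL s = s ∨ (passL s).length < s.length :=
  foldl_replace_dich pvTable table_sound s

set_option maxHeartbeats 1000000 in
set_option maxRecDepth 8192 in
theorem aiter_eq_iterate (l : List Char) : ∀ s : List Char,
    l.foldl (fun acc _ => passL acc) s = passL^[l.length] s := by
  induction l with
  | nil => intro s; rfl
  | cons c t ih =>
    intro s
    rw [List.foldl_cons, List.length_cons, Function.iterate_succ_apply]
    exact ih (passL s)

theorem iterate_fix {s : List Char} (h : passL s = s) : ∀ m, passL^[m] s = s := by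
  intro m
  induction m with
  | zero => rfl
  | succ n ih => rw [Function.iterate_succ_apply', ih, h]

theorem passL_nil : passL [] = [] := by decide

theorem fix_reached : ∀ n (s : List Char), s.length ≤ n →
    passL (passL^[n] s) = passL^[n] s := by
  intro n
  induction n with
  | zero =>
    intro s hs
    have hnil : s = [] := List.eq_nil_iff_length_eq_zero.mpr (by omega)
    subst hnil
    simp [passL_nil]
  | succ m ih =>
    intro s hs
    rcases passL_dich s with h | h
    · rw [iterate_fix h, h]
    · rw [Function.iterate_succ_apply]
      exact ih (passL s) (by omega)

-- ---- a key-free string is left alone by B's scan ----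

theorem nf_of_noinfix : ∀ (u S : List Char),
    (∀ kv ∈ pvTable, ¬ kv.1 <:+: (S ++ u)) → nf S u = S ++ u := by
  intro u
  induction u with
  | nil => intro S _; simp [nf]
  | cons c t ih =>
    intro S h
    have happ : (S ++ [c]) ++ t = S ++ (c :: t) := by simp
    have hpush : push S c = S ++ [c] := by
      unfold push
      apply reduceAll_of_none
      apply redStep_eq_none
      intro kv hkv hsuf
      obtain ⟨pre, hpre⟩ := hsuf
      exact h kv hkv ⟨pre, t, by rw [← happ, ← hpre]⟩
    show nf (push S c) t = S ++ (c :: t)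
    rw [hpush, ih (S ++ [c]) (by rw [happ]; exact h), happ]

-- ---- main theorem on the character-list side ----

set_option maxHeartbeats 1000000 in
set_option maxRecDepth 8192 in
theorem main_list (l : List Char) :
    l.foldl (fun acc _ => passL acc) l = nf [] l := by
  have hiter : l.foldl (fun acc _ => passL acc) l = passL^[l.length] l :=
    aiter_eq_iterate l l
  have hfix : passL (l.foldl (fun acc _ => passL acc) l) = l.foldl (fun acc _ => passL acc) l := by
    rw [hiter]; exact fix_reached l.length l (le_refl _)
  have hni : ∀ kv ∈ pvTable, ¬ kv.1 <:+: (l.foldl (fun acc _ => passL acc) l) :=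
    foldl_replace_fix pvTable table_sound _ hfix
  have h2 : nf [] (l.foldl (fun acc _ => passL acc) l) = l.foldl (fun acc _ => passL acc) l := by
    have := nf_of_noinfix (l.foldl (fun acc _ => passL acc) l) [] (by simpa using hni)
    simpa using this
  have h3 : nf [] (l.foldl (fun acc _ => passL acc) l) = nf [] l := nf_aiter l l []
  rw [← h3, h2]

-- ---- bridging the String-level ports to the list side ----

set_option maxHeartbeats 1000000 in
set_option maxRecDepth 8192 in
theorem toList_aPass (s : String) : (aPass s).toList = passL s.toList := by
  simp only [aPass, passL, pvTable, List.foldl, PySem.Str.toList_replace]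
  rw [show ("\\xe0" : String).toList = (['\\', 'x', 'e', '0'] : List Char) from by decide,
      show ("à" : String).toList = (['à'] : List Char) from by decide]
  rw [show ("\\xe9" : String).toList = (['\\', 'x', 'e', '9'] : List Char) from by decide,
      show ("é" : String).toList = (['é'] : List Char) from by decide]
  rw [show ("\\xe8" : String).toList = (['\\', 'x', 'e', '8'] : List Char) from by decide,
      show ("è" : String).toList = (['è'] : List Char) from by decide]
  rw [show ("\\xe7" : String).toList = (['\\', 'x', 'e', '7'] : List Char) from by decide,
      show ("ç" : String).toList = (['ç'] : List Char) from by decide]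
  rw [show ("\\xf4" : String).toList = (['\\', 'x', 'f', '4'] : List Char) from by decide,
      show ("ô" : String).toList = (['ô'] : List Char) from by decide]
  rw [show ("\\xea" : String).toList = (['\\', 'x', 'e', 'a'] : List Char) from by decide,
      show ("ê" : String).toList = (['ê'] : List Char) from by decide]
  rw [show ("\\'" : String).toList = (['\\', '\''] : List Char) from by decide,
      show ("\'" : String).toList = (['\''] : List Char) from by decide]
  rw [show ("\\xe2" : String).toList = (['\\', 'x', 'e', '2'] : List Char) from by decide,
      show ("â" : String).toList = (['â'] : List Char) from by decide]
  rw [show ("\\xfb" : String).toList = (['\\', 'x', 'f', 'b'] : List Char) from by decide,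
      show ("û" : String).toList = (['û'] : List Char) from by decide]
  rw [show ("\\xca" : String).toList = (['\\', 'x', 'c', 'a'] : List Char) from by decide,
      show ("É" : String).toList = (['É'] : List Char) from by decide]
  rw [show ("\\xc9" : String).toList = (['\\', 'x', 'c', '9'] : List Char) from by decide,
      show ("Ê" : String).toList = (['Ê'] : List Char) from by decide]
  rw [show ("\\xf9" : String).toList = (['\\', 'x', 'f', '9'] : List Char) from by decide,
      show ("ù" : String).toList = (['ù'] : List Char) from by decide]
  rw [show ("\\xef" : String).toList = (['\\', 'x', 'e', 'f'] : List Char) from by decide,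
      show ("ï" : String).toList = (['ï'] : List Char) from by decide]
  rw [show ("\\xee" : String).toList = (['\\', 'x', 'e', 'e'] : List Char) from by decide,
      show ("i" : String).toList = (['i'] : List Char) from by decide]

set_option maxHeartbeats 1000000 in
set_option maxRecDepth 8192 in
theorem toList_afold : ∀ (l : List Char) (s : String),
    (l.foldl (fun s _ => aPass s) s).toList = l.foldl (fun acc _ => passL acc) s.toList := by
  intro l
  induction l with
  | nil => intro s; rfl
  | cons c t ih =>
    intro s
    rw [List.foldl_cons, List.foldl_cons]
    have hstep := ih (aPass s)
    rw [toList_aPass] at hstep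
    exact hstep

-- ===== VERDICT (by name: the statement is the Claim_ definition above) =====
set_option maxHeartbeats 1000000 in
set_option maxRecDepth 8192 in
theorem changer_caracteres_spec : Claim_equal_changer_caracteres := by
  intro chaine _
  unfold Spec_changer_caracteres changer_caracteres changer_caracteres_alt
  rw [← String.toList_inj, String.toList_ofList, toList_afold, main_list]
  rfl
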